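-- pv_equiv track=rewrite | github.com/Flood1993/ProjectEuler | p105.py | recursively_check_condition_i
-- ===== SOURCE A (Python) =====
-- def recursively_check_condition_i(A, B, numbers_unused):
--     if not numbers_unused:
--         if A and B:
--             if sum(A) == sum(B):
--                 return False
--         return True
--
--     A_copy = [el for el in A]
--     B_copy = [el for el in B]
--     numbers_unused_copy = [el for el in numbers_unused]
--
--     next_number = numbers_unused_copy.pop()
--     A_copy_with_new_element = [el for el in A_copy]
--     A_copy_with_new_element.append(next_number)
--     B_copy_with_new_element = [el for el in B_copy]
--     B_copy_with_new_element.append(next_number)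
--
--     return recursively_check_condition_i(A_copy_with_new_element, B_copy, numbers_unused_copy) \
--             and recursively_check_condition_i(A_copy, B_copy_with_new_element, numbers_unused_copy) \
--             and recursively_check_condition_i(A_copy, B_copy, numbers_unused_copy)
-- ===== SOURCE B (Python) =====
-- def recursively_check_condition_i(A, B, numbers_unused):
--     # DP over the set of distinct reachable states (sumA - sumB, A nonempty, B nonempty);
--     # membership of (0, True, True) is monotone (every state is its own successor), so exit early.
--     states = {(sum(A) - sum(B), bool(A), bool(B))}
--     for x in reversed(numbers_unused):
--         if (0, True, True) in states:
--             return False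
--         states = {t for (d, fa, fb) in states
--                     for t in ((d + x, True, fb), (d - x, fa, True), (d, fa, fb))}
--     return (0, True, True) not in states
-- ===== Notes on version B (the rewrite author's own statement) =====
-- stated objective: alternative
-- what changed: Replaces A's three-way recursion over all assignments (copying both lists at every call) by a single left-to-right DP loop that maintains the set of distinct reachable (sumA-sumB, A-nonempty, B-nonempty) states, exits early once (0, True, True) is reachable, and checks its membership at the end.
import Mathlib
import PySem

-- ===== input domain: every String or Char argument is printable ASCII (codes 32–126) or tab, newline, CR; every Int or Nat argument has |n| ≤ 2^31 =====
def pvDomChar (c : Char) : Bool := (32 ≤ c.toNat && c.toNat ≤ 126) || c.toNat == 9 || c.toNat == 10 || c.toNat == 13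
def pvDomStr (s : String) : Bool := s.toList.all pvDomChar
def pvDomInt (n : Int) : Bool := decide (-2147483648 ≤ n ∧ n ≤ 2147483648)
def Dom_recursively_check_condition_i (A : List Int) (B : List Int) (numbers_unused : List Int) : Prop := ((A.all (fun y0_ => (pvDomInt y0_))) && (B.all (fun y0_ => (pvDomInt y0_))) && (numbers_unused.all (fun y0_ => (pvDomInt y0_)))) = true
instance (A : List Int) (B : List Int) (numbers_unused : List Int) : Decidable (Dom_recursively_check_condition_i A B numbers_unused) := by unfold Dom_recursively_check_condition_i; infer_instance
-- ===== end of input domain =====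

-- B replaces A's 3^n three-way recursion by a one-pass DP over the SET of distinct
-- reachable (sum A - sum B, A nonempty, B nonempty) states, checking (0, true, true) at the end.

-- ===== PORT A =====
def recursively_check_condition_i (A : List Int) (B : List Int) (numbers_unused : List Int) : Bool :=
  if numbers_unused = [] then
    if A ≠ [] ∧ B ≠ [] then
      if A.sum = B.sum then false else true
    else true
  else
    -- A copies its arguments before mutating; the copies are the same values here
    match h : PySem.List.pop? numbers_unused (-1) with
    | none => true  -- unreachable: the list is nonempty
    | some (next_number, rest) =>
      recursively_check_condition_i (A ++ [next_number]) B rest &&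
      recursively_check_condition_i A (B ++ [next_number]) rest &&
      recursively_check_condition_i A B rest
termination_by numbers_unused.length
decreasing_by
  all_goals
    have := PySem.List.length_of_pop?_eq_some numbers_unused h
    simp at this
    omega

-- ===== PORT B =====
/-- one DP step: all successors of the current states when x may go to A, to B, or to neither -/
def pvAltStep (states : PySem.Set (Int × Bool × Bool)) (x : Int) : PySem.Set (Int × Bool × Bool) :=
  PySem.Set.ofList (states.flatMap
    (fun s => [(s.1 + x, true, s.2.2), (s.1 - x, s.2.1, true), (s.1, s.2.1, s.2.2)]))

/-- B's loop body: early exit as soon as (0, true, true) is reachable, else step -/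
def pvAltLoop (states : PySem.Set (Int × Bool × Bool)) : List Int → Bool
  | [] => !(PySem.Set.contains states (0, true, true))
  | x :: xs =>
    if PySem.Set.contains states (0, true, true) then false
    else pvAltLoop (pvAltStep states x) xs

def recursively_check_condition_i_alt (A : List Int) (B : List Int) (numbers_unused : List Int) : Bool :=
  pvAltLoop (PySem.Set.ofList [(A.sum - B.sum, !A.isEmpty, !B.isEmpty)]) numbers_unused.reverse

-- ===== PRECONDITION & SPEC =====
def Spec_recursively_check_condition_i (A : List Int) (B : List Int) (numbers_unused : List Int) (out : Bool) : Prop := out = recursively_check_condition_i_alt A B numbers_unused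
instance (A : List Int) (B : List Int) (numbers_unused : List Int) (out : Bool) : Decidable (Spec_recursively_check_condition_i A B numbers_unused out) := by unfold Spec_recursively_check_condition_i; infer_instance

-- ===== CLAIM (what is proved, stated in full; the proofs are below) =====
def Claim_equal_recursively_check_condition_i : Prop := ∀ (A : List Int) (B : List Int) (numbers_unused : List Int), Dom_recursively_check_condition_i A B numbers_unused → Spec_recursively_check_condition_i A B numbers_unused (recursively_check_condition_i A B numbers_unused)

-- ===== LEMMAS AND PROOFS =====

/-- the three successor states when one more number x may go to A, to B, or to neither -/
def pvSuccs (s : Int × Bool × Bool) (x : Int) : List (Int × Bool × Bool) :=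
  [(s.1 + x, true, s.2.2), (s.1 - x, s.2.1, true), (s.1, s.2.1, s.2.2)]

/-- all states reachable from s by assigning the numbers xs in order -/
def pvReach (s : Int × Bool × Bool) : List Int → List (Int × Bool × Bool)
  | [] => [s]
  | x :: xs => (pvSuccs s x).flatMap (fun t => pvReach t xs)

theorem recA_char (ys : List Int) : ∀ (A B : List Int),
    recursively_check_condition_i A B ys.reverse =
      decide (∀ t ∈ pvReach (A.sum - B.sum, !A.isEmpty, !B.isEmpty) ys, t ≠ (0, true, true)) := by
  induction ys with
  | nil =>
    intro A B
    rw [recursively_check_condition_i]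
    simp [pvReach]
    by_cases hA : A = [] <;> by_cases hB : B = [] <;>
      simp [hA, hB] <;> by_cases hs : A.sum = B.sum <;> simp_all <;> omega
  | cons x ys ih =>
    intro A B
    have hrev : (x :: ys).reverse = ys.reverse ++ [x] := by simp
    rw [hrev, recursively_check_condition_i]
    have hne : ¬ (ys.reverse ++ [x] = []) := by simp
    rw [if_neg hne]
    have hpop : PySem.List.pop? (ys.reverse ++ [x]) (-1) = some (x, ys.reverse) :=
      PySem.List.pop?_last ys.reverse x
    split
    · next heq => rw [hpop] at heq; exact absurd heq (by simp)
    next nn rest heq =>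
    rw [hpop] at heq
    obtain ⟨rfl, rfl⟩ : x = nn ∧ ys.reverse = rest := by
      have := Option.some.inj heq; exact ⟨congrArg Prod.fst this, congrArg Prod.snd this⟩
    rw [ih (A ++ [x]) B, ih A (B ++ [x]), ih A B]
    simp only [pvReach, pvSuccs, List.flatMap_cons, List.flatMap_nil, List.append_nil,
      List.mem_append]
    have h1 : (A ++ [x]).sum - B.sum = A.sum - B.sum + x := by simp; ring
    have h2 : A.sum - (B ++ [x]).sum = A.sum - B.sum - x := by simp; ring
    have h3 : (A ++ [x]).isEmpty = false := by simp
    have h4 : (B ++ [x]).isEmpty = false := by simp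
    rw [h1, h2, h3, h4]
    simp only [Bool.not_false, List.flatMap_cons, List.flatMap_nil, List.append_nil,
      List.forall_mem_append, Bool.decide_and, Bool.and_assoc]

/-- membership in B's folded state set = reachability from some initial state -/
theorem mem_fold_step (ys : List Int) :
    ∀ (S : PySem.Set (Int × Bool × Bool)) (t : Int × Bool × Bool),
    t ∈ ys.foldl pvAltStep S ↔ ∃ s ∈ S, t ∈ pvReach s ys := by
  induction ys with
  | nil => intro S t; simp [pvReach]
  | cons x ys ih =>
    intro S t
    rw [List.foldl_cons, ih]
    constructor
    · rintro ⟨s', hs', ht⟩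
      rw [pvAltStep, PySem.Set.mem_ofList, List.mem_flatMap] at hs'
      obtain ⟨s, hs, hsucc⟩ := hs'
      exact ⟨s, hs, by
        simp only [pvReach, pvSuccs, List.mem_flatMap]
        exact ⟨s', by simpa [pvSuccs] using hsucc, ht⟩⟩
    · rintro ⟨s, hs, ht⟩
      simp only [pvReach, pvSuccs, List.mem_flatMap] at ht
      obtain ⟨s', hsucc, ht⟩ := ht
      refine ⟨s', ?_, ht⟩
      rw [pvAltStep, PySem.Set.mem_ofList, List.mem_flatMap]
      exact ⟨s, hs, by simpa [pvSuccs] using hsucc⟩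


theorem self_mem_reach (ys : List Int) (s : Int × Bool × Bool) : s ∈ pvReach s ys := by
  induction ys generalizing s with
  | nil => simp [pvReach]
  | cons x ys ih =>
    simp only [pvReach, pvSuccs, List.mem_flatMap]
    exact ⟨s, by simp, ih s⟩

theorem altLoop_eq (ys : List Int) : ∀ (S : PySem.Set (Int × Bool × Bool)),
    pvAltLoop S ys = !((ys.foldl pvAltStep S).contains (0, true, true)) := by
  induction ys with
  | nil => intro S; rfl
  | cons x ys ih =>
    intro S
    rw [pvAltLoop, List.foldl_cons]
    by_cases hb : PySem.Set.contains S (0, true, true) = true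
    · rw [if_pos hb]
      have hmem : (0, true, true) ∈ ys.foldl pvAltStep (pvAltStep S x) := by
        rw [mem_fold_step]
        refine ⟨(0, true, true), ?_, self_mem_reach ys _⟩
        rw [pvAltStep, PySem.Set.mem_ofList, List.mem_flatMap]
        exact ⟨(0, true, true), (PySem.Set.contains_iff S _).mp hb, by simp⟩
      rw [(PySem.Set.contains_iff _ _).mpr hmem]
      rfl
    · rw [if_neg hb]
      exact ih (pvAltStep S x)

-- ===== VERDICT (by name: the statement is the Claim_ definition above) =====
theorem recursively_check_condition_i_spec : Claim_equal_recursively_check_condition_i := by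
  intro A B numbers_unused _
  unfold Spec_recursively_check_condition_i recursively_check_condition_i_alt
  have hA := recA_char numbers_unused.reverse A B
  rw [List.reverse_reverse] at hA
  rw [hA, altLoop_eq]
  have hmem : ((0, true, true) ∈ numbers_unused.reverse.foldl pvAltStep
      (PySem.Set.ofList [(A.sum - B.sum, !A.isEmpty, !B.isEmpty)])) ↔
      (0, true, true) ∈ pvReach (A.sum - B.sum, !A.isEmpty, !B.isEmpty) numbers_unused.reverse := by
    rw [mem_fold_step]
    constructor
    · rintro ⟨s, hs, hr⟩
      rw [PySem.Set.mem_ofList] at hs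
      simp at hs
      subst hs; exact hr
    · intro hr
      exact ⟨_, by rw [PySem.Set.mem_ofList]; simp, hr⟩
  by_cases hc : (0, true, true) ∈ pvReach (A.sum - B.sum, !A.isEmpty, !B.isEmpty) numbers_unused.reverse
  · have h1 : decide (∀ t ∈ pvReach (A.sum - B.sum, !A.isEmpty, !B.isEmpty) numbers_unused.reverse,
        t ≠ (0, true, true)) = false := by
      simp only [decide_eq_false_iff_not]
      intro hall
      exact hall _ hc rfl
    have h2 := (PySem.Set.contains_iff _ (0, true, true)).mpr (hmem.mpr hc)
    simp only [h1, h2, Bool.not_true]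
  · have h1 : decide (∀ t ∈ pvReach (A.sum - B.sum, !A.isEmpty, !B.isEmpty) numbers_unused.reverse,
        t ≠ (0, true, true)) = true := by
      simp only [decide_eq_true_eq]
      rintro t ht rfl
      exact hc ht
    have h2 : (numbers_unused.reverse.foldl pvAltStep
        (PySem.Set.ofList [(A.sum - B.sum, !A.isEmpty, !B.isEmpty)])).contains (0, true, true) = false := by
      rw [← Bool.not_eq_true, PySem.Set.contains_iff, hmem]
      exact hc
    simp only [h1, h2, Bool.not_false]
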